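-- pv_equiv track=rewrite | github.com/lucasaugustus/oeis | A355552_errors.py | D3m
-- ===== SOURCE A (Python) =====
-- def D3m(n):     # The number of 3-element diagonal sets.  The "m" stands "mine".
--     # A 3-element diagonal set must have all of its x-coordinates distinct,
--     # and its set of y-coordinates must be {0,1,2}, {0,1,3}, {0,2,3}, or {1,2,3}.
--     # There is a bijection between the {0,1,2} sets and the {1,2,3} sets by replacing the y-coordinate y with 3-y,
--     # and that same operation is a bijection between the {0,1,3} sets and the {0,2,3} sets.
--     # Therefore we need only count the {0,1,2} sets and the {0,1,3} sets and then double the result.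
--     d3 = 0
--     for a in range(n):
--         for b in range(n):
--             if b == a: continue # We want diagonals only; b == a implies a vertical.
--             # For (a,0), (b,1), and (c,2) to be collinear, we need c == 2*b - a.
--             c = 2*b - a
--             if 0 <= c < n: d3 += 1
--             # For (a,0), (b,1), and (d,3) to be collinear, we need d == 3*b - 2*a
--             d = 3*b - 2*a
--             if 0 <= d < n: d3 += 1
--     return d3 * 2
-- ===== SOURCE B (Python) =====
-- def D3m(n):     # The number of 3-element diagonal sets.  The "m" stands "mine".
--     # Per-a interval counting: for fixed a, the b with 0 <= 2*b-a < n form the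
--     # interval ceil(a/2) .. (a+n-1)//2, and the b with 0 <= 3*b-2*a < n form
--     # ceil(2*a/3) .. (2*a+n-1)//3; both intervals lie inside [0, n-1] and both
--     # contain b == a, which must be excluded.  O(1) work per a instead of an
--     # inner loop over all b.
--     total = 0
--     for a in range(n):
--         c1 = (a + n - 1) // 2 - (-(-a // 2))        # interval length minus ...
--         c2 = (2*a + n - 1) // 3 - (-(-2*a // 3))    # ... the b == a member
--         total += c1 + c2
--     return total * 2
-- ===== Notes on version B (the rewrite author's own statement) =====
-- stated objective: faster
-- what changed: The inner loop over b is replaced by O(1) interval counting: for each a the valid b for each of the two collinearity conditions form a contiguous integer interval computed with floor/ceil division, with the b == a member subtracted.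
import Mathlib
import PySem

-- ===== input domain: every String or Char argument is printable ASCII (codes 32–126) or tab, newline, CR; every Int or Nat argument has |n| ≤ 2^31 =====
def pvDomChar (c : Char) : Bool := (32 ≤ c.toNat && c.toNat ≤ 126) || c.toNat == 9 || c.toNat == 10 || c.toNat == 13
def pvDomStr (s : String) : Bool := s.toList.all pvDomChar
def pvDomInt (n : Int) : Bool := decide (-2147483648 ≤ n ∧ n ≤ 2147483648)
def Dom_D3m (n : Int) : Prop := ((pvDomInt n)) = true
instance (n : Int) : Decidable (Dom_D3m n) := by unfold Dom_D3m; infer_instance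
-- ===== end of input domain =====

-- B replaces A's inner loop over b by an O(1) per-a interval count (objective: faster, O(n) vs O(n^2)).

-- ===== PORT A =====
def D3m (n : Int) : Int :=
  ((PySem.List.pyRange 0 n 1).foldl (fun d3 a =>
    (PySem.List.pyRange 0 n 1).foldl (fun d3 b =>
      if b = a then d3
      else
        let c := 2*b - a
        let d3 := if 0 ≤ c ∧ c < n then d3 + 1 else d3
        let d := 3*b - 2*a
        if 0 ≤ d ∧ d < n then d3 + 1 else d3) d3) 0) * 2

-- ===== PORT B =====
def D3m_alt (n : Int) : Int :=
  ((PySem.List.pyRange 0 n 1).foldl (fun total a =>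
    let c1 := PySem.Int.floordiv (a + n - 1) 2 - (-(PySem.Int.floordiv (-a) 2))
    let c2 := PySem.Int.floordiv (2*a + n - 1) 3 - (-(PySem.Int.floordiv (-(2*a)) 3))
    total + (c1 + c2)) 0) * 2

-- ===== PRECONDITION & SPEC =====
def Spec_D3m (n : Int) (out : Int) : Prop := out = D3m_alt n
instance (n : Int) (out : Int) : Decidable (Spec_D3m n out) := by unfold Spec_D3m; infer_instance

-- ===== CLAIM (what is proved, stated in full; the proofs are below) =====
def Claim_equal_D3m : Prop := ∀ (n : Int), Dom_D3m n → Spec_D3m n (D3m n)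

-- ===== LEMMAS AND PROOFS =====

-- Number of integers b with 0 <= b < m and L <= b <= U, for 0 <= L, U < some bound >= m,
-- written if-free enough for omega after split_ifs.
def clampCount (L U m : Int) : Int := if m ≤ L then 0 else if m ≤ U + 1 then m - L else U + 1 - L

-- A's inner loop over b ∈ [0, m), with the two in-range tests against n, evaluated in closed
-- form: clamped interval lengths minus the penalty for the skipped b = a (which satisfies both
-- tests whenever a < m).  L1/U1 and L2/U2 are the interval ends, given by their bracketing
-- inequalities so that omega can reason about them.
lemma inner_fold_eq (n a L1 U1 L2 U2 : Int) (ha0 : 0 ≤ a) (han : a < n)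
    (hL1 : 2*(L1-1) < a ∧ a ≤ 2*L1) (hU1 : 2*U1 ≤ a + n - 1 ∧ a + n - 1 < 2*(U1+1))
    (hL2 : 3*(L2-1) < 2*a ∧ 2*a ≤ 3*L2) (hU2 : 3*U2 ≤ 2*a + n - 1 ∧ 2*a + n - 1 < 3*(U2+1)) :
    ∀ (m : Int), 0 ≤ m → ∀ (d3 : Int),
      (PySem.List.pyRange 0 m 1).foldl (fun d3 b =>
        if b = a then d3
        else
          let c := 2*b - a
          let d3 := if 0 ≤ c ∧ c < n then d3 + 1 else d3
          let d := 3*b - 2*a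
          if 0 ≤ d ∧ d < n then d3 + 1 else d3) d3
      = d3 + clampCount L1 U1 m + clampCount L2 U2 m - (if a < m then 2 else 0) := by
  intro m hm
  induction m, hm using Int.le_induction with
  | base =>
    intro d3
    rw [PySem.List.pyRange_one_eq_nil (by omega)]
    simp only [List.foldl_nil, clampCount]
    split_ifs <;> omega
  | succ m hm ih =>
    intro d3
    rw [PySem.List.pyRange_one_succ_right (by omega), List.foldl_append, ih]
    simp only [List.foldl_cons, List.foldl_nil]
    have e1 : clampCount L1 U1 (m+1)
        = clampCount L1 U1 m + (if 0 ≤ 2*m - a ∧ 2*m - a < n then 1 else 0) := by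
      by_cases h1 : 0 ≤ 2*m - a ∧ 2*m - a < n <;>
        simp only [h1, and_self, if_true, if_false, clampCount] <;> split_ifs <;> omega
    have e2 : clampCount L2 U2 (m+1)
        = clampCount L2 U2 m + (if 0 ≤ 3*m - 2*a ∧ 3*m - 2*a < n then 1 else 0) := by
      by_cases h2 : 0 ≤ 3*m - 2*a ∧ 3*m - 2*a < n <;>
        simp only [h2, and_self, if_true, if_false, clampCount] <;> split_ifs <;> omega
    rw [e1, e2]
    by_cases hma : m = a
    · have h1 : 0 ≤ 2*m - a ∧ 2*m - a < n := by omega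
      have h2 : 0 ≤ 3*m - 2*a ∧ 3*m - 2*a < n := by omega
      simp only [if_pos hma, h1, h2, and_self, if_true]
      split_ifs <;> omega
    · rw [if_neg hma]
      by_cases h1 : 0 ≤ 2*m - a ∧ 2*m - a < n <;>
        by_cases h2 : 0 ≤ 3*m - 2*a ∧ 3*m - 2*a < n <;>
          (simp only [h1, h2, and_self, if_true, if_false]; split_ifs <;> omega)

-- B's per-a summand equals A's inner loop over the full range b ∈ [0, n).
lemma summand_eq (n a : Int) (ha0 : 0 ≤ a) (han : a < n) (d3 : Int) :
    (PySem.List.pyRange 0 n 1).foldl (fun d3 b =>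
        if b = a then d3
        else
          let c := 2*b - a
          let d3 := if 0 ≤ c ∧ c < n then d3 + 1 else d3
          let d := 3*b - 2*a
          if 0 ≤ d ∧ d < n then d3 + 1 else d3) d3
    = d3 + ((PySem.Int.floordiv (a + n - 1) 2 - (-(PySem.Int.floordiv (-a) 2)))
          + (PySem.Int.floordiv (2*a + n - 1) 3 - (-(PySem.Int.floordiv (-(2*a)) 3)))) := by
  have hL1 := (PySem.Int.neg_floordiv_neg_eq_iff_of_pos (a := a) (b := 2)
    (q := -(PySem.Int.floordiv (-a) 2)) (by omega)).mp rfl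
  have hU1 := (PySem.Int.floordiv_eq_iff_of_pos (a := a + n - 1) (b := 2)
    (q := PySem.Int.floordiv (a + n - 1) 2) (by omega)).mp rfl
  have hL2 := (PySem.Int.neg_floordiv_neg_eq_iff_of_pos (a := 2*a) (b := 3)
    (q := -(PySem.Int.floordiv (-(2*a)) 3)) (by omega)).mp rfl
  have hU2 := (PySem.Int.floordiv_eq_iff_of_pos (a := 2*a + n - 1) (b := 3)
    (q := PySem.Int.floordiv (2*a + n - 1) 3) (by omega)).mp rfl
  rw [inner_fold_eq n a (-(PySem.Int.floordiv (-a) 2)) (PySem.Int.floordiv (a + n - 1) 2)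
        (-(PySem.Int.floordiv (-(2*a)) 3)) (PySem.Int.floordiv (2*a + n - 1) 3)
        ha0 han (by omega) (by omega) (by omega) (by omega) n (by omega) d3]
  simp only [clampCount]
  split_ifs <;> omega

-- ===== VERDICT (by name: the statement is the Claim_ definition above) =====
theorem D3m_spec : Claim_equal_D3m := by
  intro n _
  unfold Spec_D3m D3m D3m_alt
  congr 1
  apply PySem.List.foldl_congr_mem
  intro acc a hmem
  have ha := (PySem.List.mem_pyRange_one).mp hmem
  exact summand_eq n a ha.1 ha.2 acc
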